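-- pv_equiv track=rewrite | github.com/OxyCombustion/document_translator_v14 | analysis_validation_v14_P19/src/documentation/context_aware_documentation_agent.py | _extract_module_next_steps
-- ===== SOURCE A (Python) =====
-- from typing import Dict, Any, List, Optional
--
-- def _extract_module_next_steps(content: str) -> List[str]:
--     """Extract next steps from module documentation"""
--     next_steps = []
--     lines = content.split('\n')
--
--     in_next_section = False
--     for line in lines:
--         if any(keyword in line.lower() for keyword in ['next steps', 'future', 'planned', 'todo']):
--             in_next_section = True
--             continue
--         elif line.startswith('#') and in_next_section:
--             break
--         elif in_next_section and (line.startswith('-') or line.startswith('*')):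
--             next_steps.append(line[1:].strip())
--
--     return next_steps
-- ===== SOURCE B (Python) =====
-- def _extract_module_next_steps(content: str):
--     KEYWORDS = ('next steps', 'future', 'planned', 'todo')
--
--     def kind(line):
--         if any(k in line.lower() for k in KEYWORDS):
--             return 'K'
--         if line.startswith('#'):
--             return 'H'
--         if line.startswith('-') or line.startswith('*'):
--             return 'B'
--         return 'O'
--
--     tagged = [(kind(l), l) for l in content.split('\n')]
--     kinds = [k for k, _ in tagged]
--     if 'K' not in kinds:
--         return []
--     rest = tagged[kinds.index('K') + 1:]
--     tails = [k for k, _ in rest]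
--     end = tails.index('H') if 'H' in tails else len(rest)
--     return [l[1:].strip() for k, l in rest[:end] if k == 'B']
-- ===== Notes on version B (the rewrite author's own statement) =====
-- stated objective: alternative
-- what changed: Replaced A's single stateful flag-loop with continue/break by a staged pipeline: classify every line into a kind tag once, then locate the section with list index/slice operations and extract the bullets with a comprehension.
import Mathlib
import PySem

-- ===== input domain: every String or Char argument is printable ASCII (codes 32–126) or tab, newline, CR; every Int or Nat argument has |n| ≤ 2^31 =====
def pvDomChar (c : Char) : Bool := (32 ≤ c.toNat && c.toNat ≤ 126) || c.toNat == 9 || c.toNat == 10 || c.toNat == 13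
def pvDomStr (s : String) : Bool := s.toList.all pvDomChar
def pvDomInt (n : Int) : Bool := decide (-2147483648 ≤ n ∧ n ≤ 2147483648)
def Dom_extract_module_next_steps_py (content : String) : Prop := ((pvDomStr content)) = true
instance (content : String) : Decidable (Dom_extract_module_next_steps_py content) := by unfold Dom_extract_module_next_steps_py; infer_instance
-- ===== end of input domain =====

-- B replaces A's stateful flag loop (continue/break) by a staged pipeline:
-- tag every line with a kind, then locate/slice/filter with list operations (objective: alternative).

-- the keyword test 'any(keyword in line.lower() for keyword in [...])' shared by both Pythons
def pvKw (line : String) : Bool :=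
  ["next steps", "future", "planned", "todo"].any
    (fun k => PySem.Str.isIn k (PySem.Str.lower line))

-- ===== PORT A =====
-- A's single loop carrying the in_next_section flag; 'break' = return accumulated-so-far
def pvLoopA : List String → Bool → List String
  | [], _ => []
  | l :: ls, flag =>
    if pvKw l then pvLoopA ls true
    else if PySem.Str.startswith l "#" && flag then []
    else if flag && (PySem.Str.startswith l "-" || PySem.Str.startswith l "*") then
      PySem.Str.strip (PySem.Str.slice l (some 1) none) :: pvLoopA ls flag
    else pvLoopA ls flag

def extract_module_next_steps_py (content : String) : List String :=
  pvLoopA (((PySem.Str.split? content "\n").getD [])) false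

-- ===== PORT B =====
-- Source B's kind tags 'K' 'H' 'B' 'O'
inductive PvKind | K | H | B | O
deriving DecidableEq, Repr

-- Source B's kind(line)
def pvKindOf (line : String) : PvKind :=
  if pvKw line then .K
  else if PySem.Str.startswith line "#" then .H
  else if PySem.Str.startswith line "-" || PySem.Str.startswith line "*" then .B
  else .O

def extract_module_next_steps_py_alt (content : String) : List String :=
  let tagged := (((PySem.Str.split? content "\n").getD []).map (fun l => (pvKindOf l, l)))
  let kinds := tagged.map Prod.fst
  if PvKind.K ∈ kinds then
    let rest := PySem.List.slice tagged (some ((((PySem.List.index? kinds PvKind.K).getD 0 : Nat) : Int) + 1)) none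
    let tails := rest.map Prod.fst
    let e : Int := if PvKind.H ∈ tails then (((PySem.List.index? tails PvKind.H).getD 0 : Nat) : Int) else (rest.length : Int)
    (PySem.List.slice rest none (some e)).filterMap
      (fun kl => if kl.1 = PvKind.B then some (PySem.Str.strip (PySem.Str.slice kl.2 (some 1) none)) else none)
  else []

-- ===== PRECONDITION & SPEC =====
def Spec_extract_module_next_steps_py (content : String) (out : List String) : Prop := out = extract_module_next_steps_py_alt content
instance (content : String) (out : List String) : Decidable (Spec_extract_module_next_steps_py content out) := by unfold Spec_extract_module_next_steps_py; infer_instance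

-- ===== CLAIM (what is proved, stated in full; the proofs are below) =====
def Claim_equal_extract_module_next_steps_py : Prop := ∀ (content : String), Dom_extract_module_next_steps_py content → Spec_extract_module_next_steps_py content (extract_module_next_steps_py content)

-- ===== LEMMAS AND PROOFS =====

-- proof-only intermediate form: locate the first keyword line, then collect after it
def pvLocate : List String → Option (List String)
  | [] => none
  | l :: ls => if pvKw l then some ls else pvLocate ls

def pvCollect : List String → List String
  | [] => []
  | l :: ls =>
    if pvKw l then pvCollect ls
    else if PySem.Str.startswith l "#" then []
    else if PySem.Str.startswith l "-" || PySem.Str.startswith l "*" then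
      PySem.Str.strip (PySem.Str.slice l (some 1) none) :: pvCollect ls
    else pvCollect ls

theorem loopA_true_eq_collect (ls : List String) : pvLoopA ls true = pvCollect ls := by
  induction ls with
  | nil => rfl
  | cons l ls ih =>
    simp only [pvLoopA, pvCollect, Bool.and_true, Bool.true_and]
    split_ifs <;> simp [ih]

theorem loopA_false_eq (ls : List String) :
    pvLoopA ls false = (match pvLocate ls with
      | none => []
      | some rest => pvCollect rest) := by
  induction ls with
  | nil => rfl
  | cons l ls ih =>
    simp only [pvLoopA, pvLocate, Bool.and_false, Bool.false_and]
    by_cases h : pvKw l = true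
    · simp [h, loopA_true_eq_collect]
    · simp [h, ih]

-- kind K ↔ keyword line
theorem kindOf_eq_K_iff (l : String) : pvKindOf l = PvKind.K ↔ pvKw l = true := by
  unfold pvKindOf; split_ifs with h <;> simp_all

-- tagging then projecting the kind is just the kind map
theorem map_fst_tag (xs : List String) :
    (xs.map (fun l => (pvKindOf l, l))).map Prod.fst = xs.map pvKindOf := by
  simp [List.map_map, Function.comp]

-- locate vs index? of K among the kind tags
theorem locate_index (ls : List String) :
    pvLocate ls = (PySem.List.index? (ls.map pvKindOf) PvKind.K).map (fun i => ls.drop (i + 1)) := by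
  induction ls with
  | nil => rfl
  | cons l ls ih =>
    by_cases h : pvKw l = true
    · have hk : pvKindOf l = PvKind.K := (kindOf_eq_K_iff l).2 h
      simp only [pvLocate, h, if_true, List.map_cons, hk, PySem.List.index?_cons_self,
        Option.map_some, List.drop_succ_cons, List.drop_zero]
    · have hk : pvKindOf l ≠ PvKind.K := fun hc => h ((kindOf_eq_K_iff l).1 hc)
      simp only [pvLocate, h, List.map_cons,
        PySem.List.index?_cons_of_ne _ hk, ih, Option.map_map]
      cases PySem.List.index? (ls.map pvKindOf) PvKind.K <;>
        simp [Function.comp, List.drop_succ_cons]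

-- collect = take-to-first-H then filter bullets, over the tagged list
theorem collect_pipeline (ls : List String) :
    pvCollect ls =
      ((ls.map (fun l => (pvKindOf l, l))).take
          ((PySem.List.index? (ls.map pvKindOf) PvKind.H).getD ls.length)).filterMap
        (fun kl => if kl.1 = PvKind.B then some (PySem.Str.strip (PySem.Str.slice kl.2 (some 1) none)) else none) := by
  induction ls with
  | nil => rfl
  | cons l ls ih =>
    by_cases hkw : pvKw l = true
    · have hk : pvKindOf l = PvKind.K := (kindOf_eq_K_iff l).2 hkw
      have hne : pvKindOf l ≠ PvKind.H := by simp [hk]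
      simp only [pvCollect, hkw, if_true, List.map_cons,
        PySem.List.index?_cons_of_ne _ hne, ih]
      cases PySem.List.index? (ls.map pvKindOf) PvKind.H <;>
        simp [hk, List.length_cons]
    · by_cases hH : PySem.Str.startswith l "#" = true
      · have hH' : PySem.Chars.startswith l.toList ['#'] = true := by
          simpa [PySem.Str.startswith] using hH
        have hk : pvKindOf l = PvKind.H := by unfold pvKindOf; simp [hkw, hH']
        have h1 : pvCollect (l :: ls) = [] := by
          conv_lhs => rw [pvCollect]
          rw [if_neg hkw, if_pos hH]
        rw [h1, List.map_cons, List.map_cons, hk, PySem.List.index?_cons_self]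
        simp
      · have hH' : PySem.Chars.startswith l.toList ['#'] = false := by
          simpa [PySem.Str.startswith] using hH
        have hne : pvKindOf l ≠ PvKind.H := by
          unfold pvKindOf; split_ifs <;> simp_all
        by_cases hB : (PySem.Str.startswith l "-" || PySem.Str.startswith l "*") = true
        · have hB' : PySem.Chars.startswith l.toList ['-'] = true ∨ PySem.Chars.startswith l.toList ['*'] = true := by
            simpa [PySem.Str.startswith] using hB
          have hk : pvKindOf l = PvKind.B := by unfold pvKindOf; simp [hkw, hH', hB']
          have h1 : pvCollect (l :: ls)
              = PySem.Str.strip (PySem.Str.slice l (some 1) none) :: pvCollect ls := by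
            conv_lhs => rw [pvCollect]
            rw [if_neg hkw, if_neg hH, if_pos hB]
          rw [h1, ih, List.map_cons, List.map_cons, PySem.List.index?_cons_of_ne _ hne]
          cases PySem.List.index? (ls.map pvKindOf) PvKind.H <;> simp [hk]
        · have hB' : ¬(PySem.Chars.startswith l.toList ['-'] = true ∨ PySem.Chars.startswith l.toList ['*'] = true) := by
            simpa [PySem.Str.startswith] using hB
          have hk : pvKindOf l = PvKind.O := by unfold pvKindOf; simp [hkw, hH', hB']
          have h1 : pvCollect (l :: ls) = pvCollect ls := by
            conv_lhs => rw [pvCollect]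
            rw [if_neg hkw, if_neg hH, if_neg hB]
          rw [h1, ih, List.map_cons, List.map_cons, PySem.List.index?_cons_of_ne _ hne]
          cases PySem.List.index? (ls.map pvKindOf) PvKind.H <;> simp [hk]

-- the whole pipeline of B agrees with A's loop, over any line list
theorem loop_eq_pipeline (ls : List String) :
    pvLoopA ls false =
      (let tagged := ls.map (fun l => (pvKindOf l, l))
       let kinds := tagged.map Prod.fst
       if PvKind.K ∈ kinds then
         let rest := PySem.List.slice tagged (some ((((PySem.List.index? kinds PvKind.K).getD 0 : Nat) : Int) + 1)) none
         let tails := rest.map Prod.fst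
         let e : Int := if PvKind.H ∈ tails then (((PySem.List.index? tails PvKind.H).getD 0 : Nat) : Int) else (rest.length : Int)
         (PySem.List.slice rest none (some e)).filterMap
           (fun kl => if kl.1 = PvKind.B then some (PySem.Str.strip (PySem.Str.slice kl.2 (some 1) none)) else none)
       else []) := by
  rw [loopA_false_eq, locate_index]
  simp only [map_fst_tag]
  cases hix : PySem.List.index? (ls.map pvKindOf) PvKind.K with
  | none =>
    have hmem : PvKind.K ∉ ls.map pvKindOf := (PySem.List.index?_eq_none_iff _ _).1 hix
    simp only [hmem, if_false, Option.map_none]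
  | some i =>
    have hmem : PvKind.K ∈ ls.map pvKindOf := by
      have : (PySem.List.index? (ls.map pvKindOf) PvKind.K).isSome = true := by
        rw [hix]; rfl
      exact (PySem.List.index?_isSome_iff _ _).1 this
    simp only [hmem, if_true, Option.getD_some, Option.map_some]
    have hcast : (((i : Nat) : Int) + 1) = (((i + 1 : Nat)) : Int) := by push_cast; ring
    rw [hcast, PySem.List.slice_from_natCast]
    have hdropmap : (ls.map (fun l => (pvKindOf l, l))).drop (i + 1)
        = (ls.drop (i + 1)).map (fun l => (pvKindOf l, l)) := (List.map_drop ..).symm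
    rw [hdropmap, map_fst_tag, collect_pipeline (ls.drop (i + 1))]
    cases hjx : PySem.List.index? ((ls.drop (i + 1)).map pvKindOf) PvKind.H with
    | none =>
      have hHm : PvKind.H ∉ (ls.drop (i + 1)).map pvKindOf := (PySem.List.index?_eq_none_iff _ _).1 hjx
      simp only [hHm, if_false, Option.getD_none, List.length_map,
        PySem.List.slice_to_natCast]
    | some j =>
      have hHm : PvKind.H ∈ (ls.drop (i + 1)).map pvKindOf := by
        have : (PySem.List.index? ((ls.drop (i + 1)).map pvKindOf) PvKind.H).isSome = true := by
          rw [hjx]; rfl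
        exact (PySem.List.index?_isSome_iff _ _).1 this
      simp only [hHm, if_true, Option.getD_some, PySem.List.slice_to_natCast]

-- ===== VERDICT (by name: the statement is the Claim_ definition above) =====
theorem extract_module_next_steps_py_spec : Claim_equal_extract_module_next_steps_py := by
  intro content _
  unfold Spec_extract_module_next_steps_py extract_module_next_steps_py extract_module_next_steps_py_alt
  exact loop_eq_pipeline _
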